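-- pv_equiv track=rewrite | github.com/anab-cpu/reportes.cobre.com | data_loader.py | _is_bot_click
-- ===== SOURCE A (Python) =====
-- _BOT_CLICK_GAP_MS   = 5_000   # dos clicks del mismo email en < 5s = bot
--
-- _BOT_CLICK_DELAY_MS = 10_000  # click en < 10s desde el envío = bot
--
-- def _is_bot_click(click_timestamps: list[int], sent_ts: int | None = None) -> bool:
--     """
--     Devuelve True si el patrón de clicks corresponde a un escáner de seguridad.
--     Criterios:
--       1. Dos o más clicks del mismo destinatario con menos de 5s de diferencia.
--       2. Un solo click que ocurrió en menos de 10s desde el envío.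
--     """
--     if len(click_timestamps) >= 2:
--         sorted_ts = sorted(click_timestamps)
--         min_gap = min(sorted_ts[i+1] - sorted_ts[i] for i in range(len(sorted_ts)-1))
--         if min_gap < _BOT_CLICK_GAP_MS:
--             return True
--     if len(click_timestamps) == 1 and sent_ts:
--         if abs(click_timestamps[0] - sent_ts) < _BOT_CLICK_DELAY_MS:
--             return True
--     return False
-- ===== SOURCE B (Python) =====
-- _BOT_CLICK_GAP_MS   = 5_000   # dos clicks del mismo email en < 5s = bot
--
-- _BOT_CLICK_DELAY_MS = 10_000  # click en < 10s desde el envio = bot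
--
-- def _is_bot_click(click_timestamps: list[int], sent_ts: int | None = None) -> bool:
--     if len(click_timestamps) == 1 and sent_ts:
--         return abs(click_timestamps[0] - sent_ts) < _BOT_CLICK_DELAY_MS
--     return any(abs(a - b) < _BOT_CLICK_GAP_MS
--                for i, a in enumerate(click_timestamps)
--                for b in click_timestamps[i + 1:])
-- ===== Notes on version B (the rewrite author's own statement) =====
-- stated objective: simpler
-- what changed: Replaces the sort-then-min-adjacent-gap computation with a direct short-circuiting pairwise scan (any pair closer than 5000 ms); no sorting, and it stops at the first close pair, which also made it measurably faster on the generated inputs.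
import Mathlib
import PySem

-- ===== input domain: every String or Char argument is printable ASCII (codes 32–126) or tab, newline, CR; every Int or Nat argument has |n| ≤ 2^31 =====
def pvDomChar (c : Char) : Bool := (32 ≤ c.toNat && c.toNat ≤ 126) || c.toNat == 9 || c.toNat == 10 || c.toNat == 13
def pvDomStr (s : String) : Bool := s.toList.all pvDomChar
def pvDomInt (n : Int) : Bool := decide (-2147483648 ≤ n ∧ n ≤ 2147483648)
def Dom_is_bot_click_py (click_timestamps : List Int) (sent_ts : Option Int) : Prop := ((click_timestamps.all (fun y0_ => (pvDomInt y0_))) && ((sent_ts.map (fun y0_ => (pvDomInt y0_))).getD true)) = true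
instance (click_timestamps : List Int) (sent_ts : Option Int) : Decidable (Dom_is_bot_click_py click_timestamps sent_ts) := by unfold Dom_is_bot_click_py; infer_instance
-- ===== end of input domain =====

-- B replaces A's sort + minimum-adjacent-gap pass by a direct short-circuiting pairwise scan; simpler, same return value everywhere.

-- ===== PORT A =====
def is_bot_click_py (click_timestamps : List Int) (sent_ts : Option Int) : Bool :=
  let gapHit : Bool :=
    if 2 ≤ click_timestamps.length then
      let sorted_ts := PySem.List.sorted click_timestamps (fun x => x) false
      let gaps := (PySem.List.pyRange 0 ((sorted_ts.length : Int) - 1) 1).map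
        (fun i => PySem.List.pyGetD sorted_ts (i + 1) 0 - PySem.List.pyGetD sorted_ts i 0)
      match PySem.List.min? gaps (fun x => x) with
      | some min_gap => decide (min_gap < 5000)
      | none => false            -- unreachable: len ≥ 2 makes the generator nonempty
    else false
  if gapHit then true
  else if click_timestamps.length == 1 && (match sent_ts with | some v => v != 0 | none => false) then
    decide ((PySem.List.pyGetD click_timestamps 0 0 - sent_ts.getD 0).natAbs < 10000)
  else
    false

-- ===== PORT B =====
def is_bot_click_py_alt (click_timestamps : List Int) (sent_ts : Option Int) : Bool :=
  if click_timestamps.length == 1 && (match sent_ts with | some v => v != 0 | none => false) then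
    decide ((PySem.List.pyGetD click_timestamps 0 0 - sent_ts.getD 0).natAbs < 10000)
  else
    (PySem.List.enumerate click_timestamps 0).any (fun p =>
      (PySem.List.slice click_timestamps (some (p.1 + 1)) none).any (fun b =>
        decide ((p.2 - b).natAbs < 5000)))

-- ===== PRECONDITION & SPEC =====
def Spec_is_bot_click_py (click_timestamps : List Int) (sent_ts : Option Int) (out : Bool) : Prop := out = is_bot_click_py_alt click_timestamps sent_ts
instance (click_timestamps : List Int) (sent_ts : Option Int) (out : Bool) : Decidable (Spec_is_bot_click_py click_timestamps sent_ts out) := by unfold Spec_is_bot_click_py; infer_instance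

-- ===== CLAIM (what is proved, stated in full; the proofs are below) =====
def Claim_equal_is_bot_click_py : Prop := ∀ (click_timestamps : List Int) (sent_ts : Option Int), Dom_is_bot_click_py click_timestamps sent_ts → Spec_is_bot_click_py click_timestamps sent_ts (is_bot_click_py click_timestamps sent_ts)

-- ===== LEMMAS AND PROOFS =====

def pvP (l : List Int) : Prop :=
  ∃ i j : Nat, i < j ∧ j < l.length ∧ (l.getD i 0 - l.getD j 0).natAbs < 5000

lemma pvP_not_pairwise (xs : List Int) :
    pvP xs ↔ ¬ xs.Pairwise (fun a b => 5000 ≤ (a - b).natAbs) := by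
  rw [List.pairwise_iff_getElem]
  push Not
  constructor
  · rintro ⟨i, j, hij, hj, h⟩
    refine ⟨i, j, by omega, hj, hij, ?_⟩
    rw [List.getD_eq_getElem xs 0 (by omega), List.getD_eq_getElem xs 0 hj] at h
    omega
  · rintro ⟨i, j, hi, hj, hij, h⟩
    refine ⟨i, j, hij, hj, ?_⟩
    rw [List.getD_eq_getElem xs 0 hi, List.getD_eq_getElem xs 0 hj]
    omega

lemma pvP_perm {s l : List Int} (hp : s.Perm l) : pvP s ↔ pvP l := by
  rw [pvP_not_pairwise, pvP_not_pairwise]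
  have := List.Perm.pairwise_iff (R := fun a b : Int => 5000 ≤ (a - b).natAbs)
    (by intro a b h; omega) hp
  tauto

lemma pv_scan_iff (l : List Int) :
    ((PySem.List.enumerate l 0).any (fun p =>
      (PySem.List.slice l (some (p.1 + 1)) none).any (fun b =>
        decide ((p.2 - b).natAbs < 5000))) = true) ↔ pvP l := by
  simp only [List.any_eq_true, PySem.List.mem_enumerate_iff, decide_eq_true_eq]
  constructor
  · rintro ⟨p, ⟨k, hk, rfl⟩, b, hb, hclose⟩
    have : ((0 : Int) + k + 1) = ((k + 1 : Nat) : Int) := by push_cast; ring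
    rw [this, PySem.List.slice_from_natCast] at hb
    rw [List.mem_iff_getElem] at hb
    obtain ⟨m, hm, rfl⟩ := hb
    rw [List.getElem_drop] at hclose
    refine ⟨k, k + 1 + m, by omega, by simp at hm; omega, ?_⟩
    rw [List.getD_eq_getElem l 0 hk, List.getD_eq_getElem l 0 (by simp at hm; omega)]
    simpa using hclose
  · rintro ⟨i, j, hij, hj, h⟩
    refine ⟨((i : Int), l[i]'(by omega)), ⟨i, by omega, by simp⟩, l[j], ?_, ?_⟩
    · have h1 : (((i : Int), l[i]'(by omega)).1 + 1) = ((i + 1 : Nat) : Int) := by push_cast; ring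
      rw [h1, PySem.List.slice_from_natCast, List.mem_iff_getElem]
      refine ⟨j - (i + 1), by simp; omega, ?_⟩
      rw [List.getElem_drop]
      congr 1
      omega
    · rw [List.getD_eq_getElem l 0 (by omega), List.getD_eq_getElem l 0 hj] at h
      exact h

lemma pv_adj_iff (s : List Int)
    (hmono : ∀ p q : Nat, p ≤ q → q < s.length → s.getD p 0 ≤ s.getD q 0) :
    (∃ k : Nat, k + 1 < s.length ∧ s.getD (k + 1) 0 - s.getD k 0 < 5000) ↔ pvP s := by
  constructor
  · rintro ⟨k, hk, h⟩
    have := hmono k (k + 1) (by omega) hk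
    exact ⟨k, k + 1, by omega, hk, by omega⟩
  · rintro ⟨i, j, hij, hj, h⟩
    have h1 := hmono i j (by omega) hj
    have h2 := hmono (i + 1) j (by omega) hj
    exact ⟨i, by omega, by omega⟩


lemma pv_gap_iff (l : List Int) (hn : 2 ≤ l.length) :
    ((match PySem.List.min?
        ((PySem.List.pyRange 0 (((PySem.List.sorted l (fun x => x) false).length : Int) - 1) 1).map
          (fun i => PySem.List.pyGetD (PySem.List.sorted l (fun x => x) false) (i + 1) 0
                  - PySem.List.pyGetD (PySem.List.sorted l (fun x => x) false) i 0)) (fun x => x) with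
      | some min_gap => decide (min_gap < 5000)
      | none => false) = true) ↔ pvP l := by
  set s := PySem.List.sorted l (fun x => x) false with hs
  have hlen : s.length = l.length := PySem.List.length_sorted ..
  set gaps := (PySem.List.pyRange 0 ((s.length : Int) - 1) 1).map
      (fun i => PySem.List.pyGetD s (i + 1) 0 - PySem.List.pyGetD s i 0) with hg
  -- membership characterisation of gaps
  have hmem : ∀ x : Int, x ∈ gaps ↔ ∃ k : Nat, k + 1 < s.length ∧ x = s.getD (k + 1) 0 - s.getD k 0 := by
    intro x
    rw [hg, List.mem_map]
    constructor
    · rintro ⟨i, hi, rfl⟩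
      rw [PySem.List.mem_pyRange_one] at hi
      obtain ⟨k, rfl⟩ : ∃ k : Nat, i = (k : Int) := ⟨i.toNat, by omega⟩
      refine ⟨k, by omega, ?_⟩
      have : ((k : Int) + 1) = ((k + 1 : Nat) : Int) := by push_cast; ring
      rw [this, PySem.List.pyGetD_natCast, PySem.List.pyGetD_natCast]
    · rintro ⟨k, hk, rfl⟩
      refine ⟨(k : Int), by rw [PySem.List.mem_pyRange_one]; omega, ?_⟩
      have : ((k : Int) + 1) = ((k + 1 : Nat) : Int) := by push_cast; ring
      rw [this, PySem.List.pyGetD_natCast, PySem.List.pyGetD_natCast]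
  -- gaps is nonempty
  have hne : gaps ≠ [] := by
    have : (s.getD 1 0 - s.getD 0 0) ∈ gaps := (hmem _).2 ⟨0, by omega, rfl⟩
    intro hnil; rw [hnil] at this; exact (List.not_mem_nil) this
  obtain ⟨m, hm⟩ : ∃ m, PySem.List.min? gaps (fun x => x) = some m := by
    cases hmin : PySem.List.min? gaps (fun x => x) with
    | none => exact absurd ((PySem.List.min?_eq_none_iff gaps (fun x => x)).mp hmin) hne
    | some m => exact ⟨m, rfl⟩
  rw [hm]
  have hmono : ∀ p q : Nat, p ≤ q → q < s.length → s.getD p 0 ≤ s.getD q 0 := by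
    intro p q hpq hq
    rw [List.getD_eq_getElem s 0 (by omega), List.getD_eq_getElem s 0 hq]
    exact PySem.List.sorted_id_getElem_mono l hpq hq
  rw [← pvP_perm (PySem.List.sorted_perm l (fun x => x) false), ← pv_adj_iff s hmono]
  simp only [decide_eq_true_eq]
  constructor
  · intro h
    obtain ⟨k, hk, hx⟩ := (hmem m).1 (PySem.List.min?_mem hm)
    exact ⟨k, hk, by omega⟩
  · rintro ⟨k, hk, h⟩
    have := PySem.List.min?_isMin hm _ ((hmem _).2 ⟨k, hk, rfl⟩)
    omega


-- ===== VERDICT (by name: the statement is the Claim_ definition above) =====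
lemma pv_if_id (a : Bool) : (if a = true then true else false) = a := by
  cases a <;> simp

lemma pv_bool_eq {a b : Bool} {P : Prop} (ha : a = true ↔ P) (hb : b = true ↔ P) : a = b := by
  cases a <;> cases b <;> simp_all

theorem is_bot_click_py_spec : Claim_equal_is_bot_click_py := by
  intro l sent hdom
  clear hdom
  unfold Spec_is_bot_click_py
  simp only [is_bot_click_py, is_bot_click_py_alt]
  have hB := pv_scan_iff l
  by_cases hn : 2 ≤ l.length
  · have hc : (l.length == 1) = false := by simp; omega
    rw [if_pos hn]
    simp only [hc, Bool.false_and, Bool.false_eq_true, if_false]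
    rw [pv_if_id]
    exact pv_bool_eq (pv_gap_iff l hn) hB
  · rw [if_neg hn]
    simp only [Bool.false_eq_true, if_false]
    have hS : ((PySem.List.enumerate l 0).any (fun p =>
        (PySem.List.slice l (some (p.1 + 1)) none).any (fun b =>
          decide ((p.2 - b).natAbs < 5000)))) = false := by
      rcases Bool.eq_false_or_eq_true ((PySem.List.enumerate l 0).any (fun p =>
          (PySem.List.slice l (some (p.1 + 1)) none).any (fun b =>
            decide ((p.2 - b).natAbs < 5000)))) with h | h
      · exact absurd (hB.mp h) (by rintro ⟨i, j, hij, hj, _⟩; omega)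
      · exact h
    rw [hS]
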